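-- pv_equiv track=rewrite | github.com/gentmaks/DSA_PREP | 4212-toggle-light-bulbs/toggle-light-bulbs.py | toggleLightBulbs
-- ===== SOURCE A (Python) =====
-- def toggleLightBulbs(bulbs: list[int]) -> list[int]:
--     res = []
--     on_off = {}
--     for bulb in bulbs:
--         on_off[bulb] = 1
--     for bulb in bulbs:
--         on_off[bulb] = 1 - on_off[bulb]
--     for k, v in on_off.items():
--         if not v:
--             res.append(k)
--     return sorted(res)
-- ===== SOURCE B (Python) =====
-- def toggleLightBulbs(bulbs: list[int]) -> list[int]:
--     arr = sorted(bulbs)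
--     res = []
--     i = 0
--     n = len(arr)
--     while i < n:
--         j = i + 1
--         while j < n and arr[j] == arr[i]:
--             j += 1
--         if (j - i) % 2 == 1:
--             res.append(arr[i])
--         i = j
--     return res
-- ===== Notes on version B (the rewrite author's own statement) =====
-- stated objective: alternative
-- what changed: Replaced the two hash-dict passes (initialise then parity-toggle) plus final sort by a sort-first run-length scan: sort the bulbs, walk consecutive equal runs, and keep a key exactly when its run length is odd; no dict is built and the result is emitted already sorted.
import Mathlib
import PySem

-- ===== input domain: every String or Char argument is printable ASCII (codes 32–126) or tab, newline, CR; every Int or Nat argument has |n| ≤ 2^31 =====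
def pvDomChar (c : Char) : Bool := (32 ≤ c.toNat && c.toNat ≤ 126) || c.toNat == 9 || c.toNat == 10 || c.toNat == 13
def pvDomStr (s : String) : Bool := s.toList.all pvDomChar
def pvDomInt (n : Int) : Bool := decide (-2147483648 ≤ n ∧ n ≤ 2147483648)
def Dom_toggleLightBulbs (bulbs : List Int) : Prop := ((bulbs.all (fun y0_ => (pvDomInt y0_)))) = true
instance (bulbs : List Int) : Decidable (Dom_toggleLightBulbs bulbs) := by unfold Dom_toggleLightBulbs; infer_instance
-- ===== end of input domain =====

-- B replaces A's two dict passes (init + parity toggle) + final sort by a sort-first run-length scan (same task, similar cost).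

-- ===== PORT A =====
-- first loop: on_off[bulb] = 1; second loop: on_off[bulb] = 1 - on_off[bulb]
-- (the key is always present in the second loop, so getD with default 0 is exact);
-- third loop: 'if not v: res.append(k)'; then sorted(res).
def toggleLightBulbs (bulbs : List Int) : List Int :=
  let onOff := bulbs.foldl (fun d b => d.insert b (1 : Int)) (PySem.Dict.empty)
  let onOff := bulbs.foldl (fun d b => d.insert b (1 - d.getD b 0)) onOff
  let res := onOff.items.foldl (fun r kv => if kv.2 == 0 then r ++ [kv.1] else r) []
  PySem.List.sorted res (fun x => x) false

-- ===== PORT B =====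
-- the outer while loop of Source B: take the run of the head element, keep it if the run is odd, continue on the tail
def runScan (l : List Int) : List Int :=
  match l with
  | [] => []
  | x :: xs =>
      let run := 1 + (xs.takeWhile (fun y => y == x)).length
      let rest := xs.dropWhile (fun y => y == x)
      if run % 2 = 1 then x :: runScan rest else runScan rest
termination_by l.length
decreasing_by
  all_goals
    have h := List.Sublist.length_le (List.dropWhile_sublist (p := fun y => y == x) (l := xs))
    simp only [List.length_cons]; omega

def toggleLightBulbs_alt (bulbs : List Int) : List Int :=
  runScan (PySem.List.sorted bulbs (fun x => x) false)

-- ===== PRECONDITION & SPEC =====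
def Spec_toggleLightBulbs (bulbs : List Int) (out : List Int) : Prop := out = toggleLightBulbs_alt bulbs
instance (bulbs : List Int) (out : List Int) : Decidable (Spec_toggleLightBulbs bulbs out) := by unfold Spec_toggleLightBulbs; infer_instance

-- ===== CLAIM (what is proved, stated in full; the proofs are below) =====
def Claim_equal_toggleLightBulbs : Prop := ∀ (bulbs : List Int), Dom_toggleLightBulbs bulbs → Spec_toggleLightBulbs bulbs (toggleLightBulbs bulbs)

-- ===== LEMMAS AND PROOFS =====

-- value after A's first loop
theorem getD_foldl_insert_one (l : List Int) (d : PySem.Dict Int Int) (v : Int) :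
    (l.foldl (fun d b => d.insert b (1 : Int)) d).getD v 0 =
      if v ∈ l then 1 else d.getD v 0 := by
  induction l generalizing d with
  | nil => simp
  | cons b l ih =>
      simp only [List.foldl_cons, ih, PySem.Dict.getD_insert, List.mem_cons]
      by_cases hv : v ∈ l <;> by_cases hb : v = b <;> simp [hv, hb]

-- value after A's second (toggle) loop
theorem getD_foldl_toggle (l : List Int) (d : PySem.Dict Int Int) (v : Int) :
    (l.foldl (fun d b => d.insert b (1 - d.getD b 0)) d).getD v 0 =
      if l.count v % 2 = 0 then d.getD v 0 else 1 - d.getD v 0 := by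
  induction l generalizing d with
  | nil => simp
  | cons b l ih =>
      simp only [List.foldl_cons, ih, PySem.Dict.getD_insert, List.count_cons]
      by_cases hb : v = b
      · subst hb
        rcases Nat.even_or_odd (l.count v) with he | ho
        · have h0 : l.count v % 2 = 0 := Nat.even_iff.mp he
          simp [h0, Nat.add_mod]
        · have h1 : l.count v % 2 = 1 := Nat.odd_iff.mp ho
          have : (l.count v + 1) % 2 = 0 := by omega
          simp [h1, this]
      · have : (b == v) = false := by simp; exact fun h => hb h.symm
        simp [this, hb]

-- unfolding equation for runScan on a cons
theorem runScan_cons (x : Int) (xs : List Int) :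
    runScan (x :: xs) =
      if (1 + (xs.takeWhile (fun y => y == x)).length) % 2 = 1
      then x :: runScan (xs.dropWhile (fun y => y == x))
      else runScan (xs.dropWhile (fun y => y == x)) := by
  rw [runScan]

-- in a ≤-sorted list x :: xs, everything left after the head run is strictly greater than x
theorem sorted_drop_lt (x : Int) (xs : List Int) (hs : (x :: xs).Pairwise (· ≤ ·)) :
    ∀ v ∈ xs.dropWhile (fun y => y == x), x < v := by
  intro v hv
  rcases hr : xs.dropWhile (fun y => y == x) with _ | ⟨z, r'⟩
  · rw [hr] at hv; simp at hv
  · have hz : ¬ (z == x) = true := by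
      have h := List.head?_dropWhile_not (p := fun y => y == x) (l := xs)
      rw [hr] at h; simpa using h
    have hzx : z ≠ x := by simpa using hz
    have hxle : x ≤ z := by
      have hzxs : z ∈ xs := (List.dropWhile_sublist _).mem (by rw [hr]; simp)
      exact (List.pairwise_cons.mp hs).1 z hzxs
    have hxz : x < z := lt_of_le_of_ne hxle (fun h => hzx h.symm)
    have hrest : (xs.dropWhile (fun y => y == x)).Pairwise (· ≤ ·) :=
      ((List.pairwise_cons.mp hs).2).sublist (List.dropWhile_sublist _)
    rw [hr] at hv hrest
    rcases List.mem_cons.mp hv with h | h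
    · exact h ▸ hxz
    · exact lt_of_lt_of_le hxz ((List.pairwise_cons.mp hrest).1 v h)

theorem not_mem_drop_self (x : Int) (xs : List Int) (hs : (x :: xs).Pairwise (· ≤ ·)) :
    x ∉ xs.dropWhile (fun y => y == x) := by
  intro h; exact lt_irrefl x (sorted_drop_lt x xs hs x h)

-- count of the head element is the head-run length
theorem count_head_run (x : Int) (xs : List Int) (hs : (x :: xs).Pairwise (· ≤ ·)) :
    (x :: xs).count x = 1 + (xs.takeWhile (fun y => y == x)).length := by
  have hsplit : xs.takeWhile (fun y => y == x) ++ xs.dropWhile (fun y => y == x) = xs :=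
    List.takeWhile_append_dropWhile
  have hxs : xs.count x = (xs.takeWhile (fun y => y == x)).count x
      + (xs.dropWhile (fun y => y == x)).count x := by
    conv_lhs => rw [← hsplit]
    rw [List.count_append]
  have h1 : (xs.takeWhile (fun y => y == x)).count x = (xs.takeWhile (fun y => y == x)).length := by
    apply List.count_eq_length.mpr
    intro y hy
    have h' : y = x := by simpa using List.mem_takeWhile_imp hy
    omega
  have h2 : (xs.dropWhile (fun y => y == x)).count x = 0 :=
    List.count_eq_zero.mpr (not_mem_drop_self x xs hs)
  rw [List.count_cons_self]
  omega

-- count of any other element survives dropping the head run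
theorem count_other (x w : Int) (hw : w ≠ x) (xs : List Int) :
    (x :: xs).count w = (xs.dropWhile (fun y => y == x)).count w := by
  have hsplit : xs.takeWhile (fun y => y == x) ++ xs.dropWhile (fun y => y == x) = xs :=
    List.takeWhile_append_dropWhile
  have hxs : xs.count w = (xs.takeWhile (fun y => y == x)).count w
      + (xs.dropWhile (fun y => y == x)).count w := by
    conv_lhs => rw [← hsplit]
    rw [List.count_append]
  have h1 : (xs.takeWhile (fun y => y == x)).count w = 0 := by
    apply List.count_eq_zero.mpr
    intro hwmem
    have := List.mem_takeWhile_imp hwmem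
    exact hw (by simpa using this)
  have hx : (x == w) = false := by simp; exact fun h => hw h.symm
  rw [List.count_cons, hx]
  simp only [Bool.false_eq_true, if_false]
  omega

-- runScan of a ≤-sorted list contains exactly the odd-count values
theorem mem_runScan (l : List Int) (hs : l.Pairwise (· ≤ ·)) (v : Int) :
    v ∈ runScan l ↔ l.count v % 2 = 1 := by
  induction l using runScan.induct with
  | case1 => simp [runScan]
  | case2 x xs run rest hodd ih =>
      have hrun : run = 1 + (xs.takeWhile (fun y => y == x)).length := rfl
      have hrest_eq : rest = xs.dropWhile (fun y => y == x) := rfl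
      rw [hrun] at hodd
      rw [hrest_eq] at ih
      have hrest : (xs.dropWhile (fun y => y == x)).Pairwise (· ≤ ·) :=
        ((List.pairwise_cons.mp hs).2).sublist (List.dropWhile_sublist _)
      rw [runScan_cons, if_pos hodd]
      by_cases hv : v = x
      · subst hv
        have hc := count_head_run v xs hs
        exact ⟨fun _ => by omega, fun _ => List.mem_cons_self⟩
      · rw [List.mem_cons, count_other x v hv]
        simp only [hv, false_or]
        exact ih hrest
  | case3 x xs run rest heven ih =>
      have hrun : run = 1 + (xs.takeWhile (fun y => y == x)).length := rfl
      have hrest_eq : rest = xs.dropWhile (fun y => y == x) := rfl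
      rw [hrun] at heven
      rw [hrest_eq] at ih
      have hrest : (xs.dropWhile (fun y => y == x)).Pairwise (· ≤ ·) :=
        ((List.pairwise_cons.mp hs).2).sublist (List.dropWhile_sublist _)
      rw [runScan_cons, if_neg heven]
      by_cases hv : v = x
      · subst hv
        have hc := count_head_run v xs hs
        have h1 : ¬ (v :: xs).count v % 2 = 1 := by omega
        have h2 : v ∉ runScan (xs.dropWhile (fun y => y == v)) := by
          intro hmem
          have hcount := (ih hrest).mp hmem
          have h0 : (xs.dropWhile (fun y => y == v)).count v = 0 :=
            List.count_eq_zero.mpr (not_mem_drop_self v xs hs)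
          omega
        exact iff_of_false h2 h1
      · rw [count_other x v hv]
        exact ih hrest

-- runScan of a ≤-sorted list is strictly increasing
theorem runScan_pairwise_lt (l : List Int) (hs : l.Pairwise (· ≤ ·)) :
    (runScan l).Pairwise (· < ·) := by
  induction l using runScan.induct with
  | case1 => simp [runScan]
  | case2 x xs run rest hodd ih =>
      have hrun : run = 1 + (xs.takeWhile (fun y => y == x)).length := rfl
      have hrest_eq : rest = xs.dropWhile (fun y => y == x) := rfl
      rw [hrun] at hodd
      rw [hrest_eq] at ih
      have hrest : (xs.dropWhile (fun y => y == x)).Pairwise (· ≤ ·) :=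
        ((List.pairwise_cons.mp hs).2).sublist (List.dropWhile_sublist _)
      rw [runScan_cons, if_pos hodd]
      refine List.pairwise_cons.mpr ⟨?_, ih hrest⟩
      intro v hv
      have hvodd := (mem_runScan _ hrest v).mp hv
      have hvmem : v ∈ xs.dropWhile (fun y => y == x) := by
        by_contra hn
        have : (xs.dropWhile (fun y => y == x)).count v = 0 := List.count_eq_zero.mpr hn
        omega
      exact sorted_drop_lt x xs hs v hvmem
  | case3 x xs run rest heven ih =>
      have hrun : run = 1 + (xs.takeWhile (fun y => y == x)).length := rfl
      have hrest_eq : rest = xs.dropWhile (fun y => y == x) := rfl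
      rw [hrun] at heven
      rw [hrest_eq] at ih
      have hrest : (xs.dropWhile (fun y => y == x)).Pairwise (· ≤ ·) :=
        ((List.pairwise_cons.mp hs).2).sublist (List.dropWhile_sublist _)
      rw [runScan_cons, if_neg heven]
      exact ih hrest

-- A's result in closed form: sort the final dict's zero-valued keys
theorem toggleLightBulbs_eq (bulbs : List Int) :
    toggleLightBulbs bulbs =
      PySem.List.sorted
        ((bulbs.foldl (fun d b => d.insert b (1 - d.getD b 0))
            (bulbs.foldl (fun d b => d.insert b (1 : Int)) PySem.Dict.empty)).keys.filter
          (fun k => (bulbs.foldl (fun d b => d.insert b (1 - d.getD b 0))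
            (bulbs.foldl (fun d b => d.insert b (1 : Int)) PySem.Dict.empty)).getD k 0 == 0))
        (fun x => x) false := by
  have hnd1 : (bulbs.foldl (fun d b => d.insert b (1 : Int)) PySem.Dict.empty).keys.Nodup :=
    PySem.Dict.nodup_keys_foldl_insert _ _ _ (by simp)
  have hnd2 : (bulbs.foldl (fun d b => d.insert b (1 - d.getD b 0))
      (bulbs.foldl (fun d b => d.insert b (1 : Int)) PySem.Dict.empty)).keys.Nodup :=
    PySem.Dict.nodup_keys_foldl_insert _ _ _ hnd1
  show PySem.List.sorted
      ((bulbs.foldl (fun d b => d.insert b (1 - d.getD b 0))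
          (bulbs.foldl (fun d b => d.insert b (1 : Int)) PySem.Dict.empty)).items.foldl
        (fun r kv => if kv.2 == 0 then r ++ [kv.1] else r) []) (fun x => x) false = _
  rw [PySem.List.foldl_append_if]
  rw [PySem.Dict.items_eq_map_keys _ hnd2 0]
  rw [List.filter_map, List.map_map]
  simp [Function.comp_def]

theorem nodup_keys_d2 (bulbs : List Int) :
    (bulbs.foldl (fun d b => d.insert b (1 - d.getD b 0))
      (bulbs.foldl (fun d b => d.insert b (1 : Int)) PySem.Dict.empty)).keys.Nodup :=
  PySem.Dict.nodup_keys_foldl_insert _ _ _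
    (PySem.Dict.nodup_keys_foldl_insert _ _ _ (by simp))

theorem mem_keys_d2 (bulbs : List Int) (v : Int) :
    v ∈ (bulbs.foldl (fun d b => d.insert b (1 - d.getD b 0))
      (bulbs.foldl (fun d b => d.insert b (1 : Int)) PySem.Dict.empty)).keys ↔ v ∈ bulbs := by
  rw [PySem.Dict.keys_foldl_insert, PySem.Dict.keys_foldl_insert]
  rw [PySem.Set.mem_update, PySem.Set.mem_update]
  simp [PySem.Dict.keys_empty]

-- final value at v ∈ bulbs is 0 exactly when the count is odd
theorem getD_d2 (bulbs : List Int) (v : Int) (hv : v ∈ bulbs) :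
    ((bulbs.foldl (fun d b => d.insert b (1 - d.getD b 0))
      (bulbs.foldl (fun d b => d.insert b (1 : Int)) PySem.Dict.empty)).getD v 0 = 0
      ↔ bulbs.count v % 2 = 1) := by
  rw [getD_foldl_toggle, getD_foldl_insert_one]
  by_cases h : bulbs.count v % 2 = 0
  · rw [if_pos h, if_pos hv]
    constructor
    · intro hh; exact absurd hh one_ne_zero
    · intro hh; omega
  · rw [if_neg h, if_pos hv]
    norm_num
    omega

-- ===== VERDICT (by name: the statement is the Claim_ definition above) =====
theorem toggleLightBulbs_spec : Claim_equal_toggleLightBulbs := by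
  intro bulbs _
  show toggleLightBulbs bulbs = toggleLightBulbs_alt bulbs
  rw [toggleLightBulbs_eq]
  unfold toggleLightBulbs_alt
  set S := PySem.List.sorted bulbs (fun x => x) false with hS
  have hSperm : S.Perm bulbs := PySem.List.sorted_perm bulbs (fun x => x) false
  have hSsorted : S.Pairwise (· ≤ ·) := PySem.List.sorted_pairwise bulbs (fun x => x)
  set d2 := bulbs.foldl (fun d b => d.insert b (1 - d.getD b 0))
      (bulbs.foldl (fun d b => d.insert b (1 : Int)) PySem.Dict.empty) with hd2
  set res := d2.keys.filter (fun k => d2.getD k 0 == 0) with hres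
  have hmemres : ∀ v : Int, v ∈ res ↔ bulbs.count v % 2 = 1 := by
    intro v
    rw [hres, List.mem_filter]
    rw [beq_iff_eq]
    constructor
    · rintro ⟨hk, hz⟩
      exact (getD_d2 bulbs v ((mem_keys_d2 bulbs v).mp hk)).mp hz
    · intro hodd
      have hvmem : v ∈ bulbs := by
        by_contra hn
        have : bulbs.count v = 0 := List.count_eq_zero.mpr hn
        omega
      exact ⟨(mem_keys_d2 bulbs v).mpr hvmem, (getD_d2 bulbs v hvmem).mpr hodd⟩
  have hmemrun : ∀ v : Int, v ∈ runScan S ↔ bulbs.count v % 2 = 1 := by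
    intro v
    rw [mem_runScan S hSsorted v, hSperm.count_eq]
  have hltrun : (runScan S).Pairwise (· < ·) := runScan_pairwise_lt S hSsorted
  have hndrun : (runScan S).Nodup := hltrun.imp ne_of_lt
  have hndres : res.Nodup := (nodup_keys_d2 bulbs).filter _
  have hperm : (runScan S).Perm res := by
    rw [List.perm_ext_iff_of_nodup hndrun hndres]
    intro v; rw [hmemrun v, hmemres v]
  exact PySem.List.sorted_eq_of_perm_of_pairwise_lt res (runScan S) (fun x => x) hperm hltrun
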